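-- pv_equiv track=rewrite | github.com/dvzhang/gryphsis | hw3/hw3.py | create_sybils
-- ===== SOURCE A (Python) =====
-- def create_sybils(ip_pool, wallets):
--     """
--     Parameters:
--     ip_pool - the ip list, which contain 8 ip, will be used. ex:(2, 3, 5, 6, 7, 8, 9, 10)
--     wallets - the wallets will be used ex: [1, 2, 3, 4, 5]
--
--     Returns:
--         all possible combination between ip_pool & wallets
--
--     EX:
--         len(create_sybils((2, 3, 5, 6, 7, 8, 9, 10), range(1, 6))) == 390625 == 5^8
--     """
--     # 递归结束
--     if len(ip_pool) == 1:
--         return [["{}-{}".format(ip_pool[0], wallet)] for wallet in wallets]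
--     # 递归，减而治之
--     sybils = create_sybils(ip_pool[1:], wallets)
--     ans = []
--     for sybil in sybils:
--         for wallet in wallets:
--             ans.append(["{}-{}".format(ip_pool[0], wallet)] + sybil)
--     return ans
-- ===== SOURCE B (Python) =====
-- def create_sybils(ip_pool, wallets):
--     # Iterative accumulation instead of A's reduce-and-conquer recursion:
--     # start from the base case over the last IP, then expand from second-last
--     # IP to the first; each layer's "ip-wallet" labels are formatted once,
--     # not once per output row.  Same order as A (first coordinate varies fastest).
--     result = [["{}-{}".format(ip_pool[-1], w)] for w in wallets]
--     for ip in reversed(ip_pool[:-1]):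
--         labels = ["{}-{}".format(ip, w) for w in wallets]
--         result = [[lab] + s for s in result for lab in labels]
--     return result
-- ===== Notes on version B (the rewrite author's own statement) =====
-- stated objective: alternative
-- what changed: Replaces the reduce-and-conquer recursion with an explicit iterative accumulation: build the base layer from the last IP, then expand layer by layer from the second-last IP to the first.
import Mathlib
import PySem

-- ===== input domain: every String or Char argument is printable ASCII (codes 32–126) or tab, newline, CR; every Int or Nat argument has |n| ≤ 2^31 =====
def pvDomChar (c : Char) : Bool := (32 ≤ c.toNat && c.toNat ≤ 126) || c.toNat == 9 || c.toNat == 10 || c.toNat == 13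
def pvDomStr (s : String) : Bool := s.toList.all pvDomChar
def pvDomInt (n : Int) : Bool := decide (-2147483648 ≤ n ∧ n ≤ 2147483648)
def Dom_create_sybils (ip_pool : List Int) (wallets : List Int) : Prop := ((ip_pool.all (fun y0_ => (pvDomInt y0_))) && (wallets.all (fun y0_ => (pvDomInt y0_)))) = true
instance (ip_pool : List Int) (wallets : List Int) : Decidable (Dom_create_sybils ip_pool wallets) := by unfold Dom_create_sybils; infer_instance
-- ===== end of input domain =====

-- B replaces A's reduce-and-conquer recursion by an iterative layer-by-layer accumulation
-- from the last IP back to the first (objective: alternative; return value only).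

-- "{}-{}".format(ip, wallet)
def pvFmt (ip w : Int) : String := PySem.Int.toStr ip ++ "-" ++ PySem.Int.toStr w

-- ===== PORT A =====
def create_sybils : List Int → List Int → List (List String)
  | [], _ => []          -- unreachable under Pre_: Python A recurses forever (RecursionError) here
  | [ip], wallets => wallets.map (fun w => [pvFmt ip w])
  | ip :: r :: rest, wallets =>
      let sybils := create_sybils (r :: rest) wallets
      sybils.foldl (fun ans s => wallets.foldl (fun a w => a ++ [pvFmt ip w :: s]) ans) []

-- ===== PORT B =====
def create_sybils_alt (ip_pool : List Int) (wallets : List Int) : List (List String) :=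
  match ip_pool.getLast? with
  | none => []           -- unreachable under Pre_: Python B raises IndexError on ip_pool[-1]
  | some lastIp =>
      (ip_pool.dropLast.reverse).foldl
        (fun result ip =>
          let labels := wallets.map (fun w => pvFmt ip w)
          result.flatMap (fun s => labels.map (fun lab => lab :: s)))
        (wallets.map (fun w => [pvFmt lastIp w]))

-- ===== PRECONDITION & SPEC =====
-- On an empty ip_pool A raises RecursionError (its base case is len==1); Pre_ excludes it.
def Pre_create_sybils (ip_pool : List Int) (wallets : List Int) : Prop := ip_pool ≠ []
instance (ip_pool : List Int) (wallets : List Int) : Decidable (Pre_create_sybils ip_pool wallets) := by unfold Pre_create_sybils; infer_instance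
def pvWitness_create_sybils : List Int × List Int := ([1, 2], [3, 4])

def Spec_create_sybils (ip_pool : List Int) (wallets : List Int) (out : List (List String)) : Prop := out = create_sybils_alt ip_pool wallets
instance (ip_pool : List Int) (wallets : List Int) (out : List (List String)) : Decidable (Spec_create_sybils ip_pool wallets out) := by unfold Spec_create_sybils; infer_instance

-- ===== CLAIM (what is proved, stated in full; the proofs are below) =====
def Claim_equal_create_sybils : Prop := ∀ (ip_pool : List Int) (wallets : List Int), Dom_create_sybils ip_pool wallets → Pre_create_sybils ip_pool wallets → Spec_create_sybils ip_pool wallets (create_sybils ip_pool wallets)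

-- ===== LEMMAS AND PROOFS =====

-- A's nested append loops are one flatMap layer.
theorem create_sybils_cons_cons (ip r : Int) (rest wallets : List Int) :
    create_sybils (ip :: r :: rest) wallets =
      (create_sybils (r :: rest) wallets).flatMap
        (fun s => wallets.map (fun w => pvFmt ip w :: s)) := by
  show (create_sybils (r :: rest) wallets).foldl
        (fun ans s => wallets.foldl (fun a w => a ++ [pvFmt ip w :: s]) ans) [] = _
  have hfun : (fun (ans : List (List String)) (s : List String) =>
        wallets.foldl (fun a w => a ++ [pvFmt ip w :: s]) ans)
      = fun ans s => ans ++ wallets.map (fun w => pvFmt ip w :: s) := by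
    funext ans s
    exact PySem.List.foldl_append_singleton_eq_map _ _ _
  rw [hfun, PySem.List.foldl_append_eq_flatMap, List.nil_append]

-- B peels off its first expansion step for a head IP.
theorem create_sybils_alt_cons_cons (ip r : Int) (rest wallets : List Int) :
    create_sybils_alt (ip :: r :: rest) wallets =
      (create_sybils_alt (r :: rest) wallets).flatMap
        (fun s => wallets.map (fun w => pvFmt ip w :: s)) := by
  cases hrl : (r :: rest).getLast? with
  | none => simp at hrl
  | some l =>
      simp [create_sybils_alt, List.getLast?_cons_cons, hrl, List.dropLast_cons₂,
        List.foldl_append, List.map_map, Function.comp_def]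

-- The two ports agree on every input (both return [] on an empty ip_pool as well).
theorem create_sybils_eq (ip_pool wallets : List Int) :
    create_sybils ip_pool wallets = create_sybils_alt ip_pool wallets := by
  induction ip_pool with
  | nil => simp [create_sybils, create_sybils_alt]
  | cons ip tl ih =>
      cases tl with
      | nil => simp [create_sybils, create_sybils_alt]
      | cons r rest =>
          rw [create_sybils_cons_cons, create_sybils_alt_cons_cons, ih]

-- ===== VERDICT (by name: the statement is the Claim_ definition above) =====
theorem create_sybils_spec : Claim_equal_create_sybils := by
  intro ip_pool wallets _ _
  exact create_sybils_eq ip_pool wallets
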